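-- pv_equiv track=rewrite | github.com/ben-kodbiz/fasaadGov | harvester/integrate_news.py | _create_news_summary
-- ===== SOURCE A (Python) =====
-- def _create_news_summary(full_summary: str, company_name: str) -> str:
--     """Create a concise news summary from the full scraped content"""
--     if not full_summary:
--         return f"Investigation reveals {company_name}'s involvement in providing technology and services that enable military operations."
--
--     # Find the company-specific content (usually starts after general intro)
--     # Look for the company name in the text to find relevant section
--     company_section = ""
--     lines = full_summary.split('\n')
--
--     found_company_section = False
--     for line in lines:
--         line = line.strip()
--         if company_name.lower() in line.lower() and len(line) > 50:
--             found_company_section = True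
--             company_section = line
--             break
--
--     if not found_company_section:
--         # Fallback: use first substantial paragraph
--         for line in lines:
--             line = line.strip()
--             if len(line) > 100 and not line.startswith('Quaker') and not line.startswith('Our Work'):
--                 company_section = line
--                 break
--
--     if not company_section:
--         company_section = f"Comprehensive investigation reveals {company_name}'s involvement in military operations and weapons supply chains."
--
--     # Limit to 400 characters for news summary
--     if len(company_section) > 400:
--         company_section = company_section[:400] + "..."
--
--     return company_section
-- ===== SOURCE B (Python) =====
-- def _create_news_summary(full_summary: str, company_name: str) -> str:
--     """Create a concise news summary from the full scraped content"""
--     if not full_summary: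
--         return f"Investigation reveals {company_name}'s involvement in providing technology and services that enable military operations."
--
--     primary = None
--     fallback = None
--     needle = company_name.lower()
--     for raw in full_summary.split('\n'):
--         line = raw.strip()
--         if needle in line.lower() and len(line) > 50:
--             primary = line
--             break
--         if fallback is None and len(line) > 100 and not line.startswith('Quaker') and not line.startswith('Our Work'):
--             fallback = line
--
--     if primary is not None:
--         section = primary
--     elif fallback is not None:
--         section = fallback
--     else:
--         section = f"Comprehensive investigation reveals {company_name}'s involvement in military operations and weapons supply chains."
--
--     if len(section) > 400:
--         section = section[:400] + "..."
--     return section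
-- ===== Notes on version B (the rewrite author's own statement) =====
-- stated objective: alternative
-- what changed: Replaces A's two sequential scans (company scan, then a full fallback re-scan) with one pass that carries both candidates (break on the company match, record the first fallback), then selects primary/fallback/default.
import Mathlib
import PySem

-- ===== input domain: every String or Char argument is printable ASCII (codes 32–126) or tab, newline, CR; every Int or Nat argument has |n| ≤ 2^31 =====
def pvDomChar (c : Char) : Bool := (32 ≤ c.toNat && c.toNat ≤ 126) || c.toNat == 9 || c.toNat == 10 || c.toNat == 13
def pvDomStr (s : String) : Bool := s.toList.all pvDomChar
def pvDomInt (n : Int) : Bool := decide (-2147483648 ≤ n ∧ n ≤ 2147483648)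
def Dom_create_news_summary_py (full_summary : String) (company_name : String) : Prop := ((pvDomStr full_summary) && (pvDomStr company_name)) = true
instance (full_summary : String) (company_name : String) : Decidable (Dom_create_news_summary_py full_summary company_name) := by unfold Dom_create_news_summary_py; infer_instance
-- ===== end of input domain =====

-- B replaces A's two sequential scans with one pass carrying both candidates (same results; alternative decomposition, not faster).


-- ===== PORT A =====
-- first loop of A: break on the first stripped line containing the company name with len > 50 (found-flag + section string, as in A)
def pvA_findCompany (company_name : String) : List String → Bool × String
  | [] => (false, "")
  | l :: rest =>
    let line := PySem.Str.strip l
    if PySem.Str.isIn (PySem.Str.lower company_name) (PySem.Str.lower line) && 50 < PySem.Str.len line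
    then (true, line)
    else pvA_findCompany company_name rest

-- second loop of A: first stripped line with len > 100 not starting with 'Quaker'/'Our Work' ("" if none)
def pvA_fallback : List String → String
  | [] => ""
  | l :: rest =>
    let line := PySem.Str.strip l
    if 100 < PySem.Str.len line && !(PySem.Str.startswith line "Quaker") && !(PySem.Str.startswith line "Our Work")
    then line
    else pvA_fallback rest

def create_news_summary_py (full_summary : String) (company_name : String) : String :=
  if PySem.Str.len full_summary == 0 then
    "Investigation reveals " ++ company_name ++ "'s involvement in providing technology and services that enable military operations."
  else
    let lines := (PySem.Chars.splitOn full_summary.toList ['\n']).map String.ofList  -- full_summary.split('\n')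
    let r := pvA_findCompany company_name lines
    let cs := if !r.1 then pvA_fallback lines else r.2
    let cs := if PySem.Str.len cs == 0 then
        "Comprehensive investigation reveals " ++ company_name ++ "'s involvement in military operations and weapons supply chains."
      else cs
    if 400 < PySem.Str.len cs then PySem.Str.slice cs none (some 400) ++ "..." else cs

-- ===== PORT B =====
def pvB_primary (needle line : String) : Bool :=
  PySem.Str.isIn needle (PySem.Str.lower line) && 50 < PySem.Str.len line

def pvB_fallbackOK (line : String) : Bool :=
  100 < PySem.Str.len line && !(PySem.Str.startswith line "Quaker") && !(PySem.Str.startswith line "Our Work")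

-- the single pass of B: carries (primary?, fallback?) and breaks on a primary match
def pvB_scan (needle : String) (fb : Option String) : List String → Option String × Option String
  | [] => (none, fb)
  | raw :: rest =>
    let line := PySem.Str.strip raw
    if pvB_primary needle line then (some line, fb)
    else pvB_scan needle (if fb.isNone && pvB_fallbackOK line then some line else fb) rest

def create_news_summary_py_alt (full_summary : String) (company_name : String) : String :=
  if PySem.Str.len full_summary == 0 then
    "Investigation reveals " ++ company_name ++ "'s involvement in providing technology and services that enable military operations."
  else
    let r := pvB_scan (PySem.Str.lower company_name) none
      ((PySem.Chars.splitOn full_summary.toList ['\n']).map String.ofList)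
    let sect :=
      match r.1 with
      | some s => s
      | none =>
        match r.2 with
        | some s => s
        | none => "Comprehensive investigation reveals " ++ company_name ++ "'s involvement in military operations and weapons supply chains."
    if 400 < PySem.Str.len sect then PySem.Str.slice sect none (some 400) ++ "..." else sect

-- ===== PRECONDITION & SPEC =====
def Spec_create_news_summary_py (full_summary : String) (company_name : String) (out : String) : Prop := out = create_news_summary_py_alt full_summary company_name
instance (full_summary : String) (company_name : String) (out : String) : Decidable (Spec_create_news_summary_py full_summary company_name out) := by unfold Spec_create_news_summary_py; infer_instance

-- ===== CLAIM (what is proved, stated in full; the proofs are below) =====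
def Claim_equal_create_news_summary_py : Prop := ∀ (full_summary : String) (company_name : String), Dom_create_news_summary_py full_summary company_name → Spec_create_news_summary_py full_summary company_name (create_news_summary_py full_summary company_name)

-- ===== LEMMAS AND PROOFS =====

-- Option-valued view of A's fallback loop, used only in the proofs
def pvFallOpt : List String → Option String
  | [] => none
  | l :: rest =>
    let line := PySem.Str.strip l
    if pvB_fallbackOK line then some line else pvFallOpt rest

theorem pvA_fallback_eq (lines : List String) : pvA_fallback lines = (pvFallOpt lines).getD "" := by
  induction lines with
  | nil => rfl
  | cons l rest ih =>
    simp only [pvA_fallback, pvFallOpt, pvB_fallbackOK]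
    split <;> simp [ih]

theorem pvFallOpt_len {lines : List String} {s : String} (h : pvFallOpt lines = some s) :
    100 < PySem.Str.len s := by
  induction lines with
  | nil => simp [pvFallOpt] at h
  | cons l rest ih =>
    simp only [pvFallOpt] at h
    split at h
    · rename_i hp
      cases h
      simp only [pvB_fallbackOK, Bool.and_eq_true, decide_eq_true_eq] at hp
      exact hp.1.1
    · exact ih h

theorem pvA_findCompany_len {cn : String} {lines : List String} {s : String}
    (h : pvA_findCompany cn lines = (true, s)) : 50 < PySem.Str.len s := by
  induction lines with
  | nil => simp [pvA_findCompany] at h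
  | cons l rest ih =>
    simp only [pvA_findCompany] at h
    split at h
    · rename_i hp
      cases h
      simp only [Bool.and_eq_true, decide_eq_true_eq] at hp
      exact hp.2
    · exact ih h

theorem pvB_scan_fst (cn : String) (lines : List String) (fb : Option String) :
    (pvB_scan (PySem.Str.lower cn) fb lines).1 =
      (if (pvA_findCompany cn lines).1 then some (pvA_findCompany cn lines).2 else none) := by
  induction lines generalizing fb with
  | nil => rfl
  | cons l rest ih =>
    simp only [pvB_scan, pvA_findCompany, pvB_primary]
    split <;> simp [ih]

theorem pvB_scan_snd (cn : String) {lines : List String} (fb : Option String)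
    (h : (pvA_findCompany cn lines).1 = false) :
    (pvB_scan (PySem.Str.lower cn) fb lines).2 = fb.or (pvFallOpt lines) := by
  induction lines generalizing fb with
  | nil => cases fb <;> rfl
  | cons l rest ih =>
    simp only [pvA_findCompany] at h
    simp only [pvB_scan, pvB_primary, pvFallOpt]
    split at h
    · simp at h
    · rename_i hp
      rw [if_neg hp]
      cases fb with
      | some x => simp [ih _ h]
      | none =>
        by_cases hq : pvB_fallbackOK (PySem.Str.strip l) = true
        · simp [hq, ih _ h]
        · simp only [Bool.not_eq_true] at hq
          simp [hq, ih _ h]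

-- ===== VERDICT (by name: the statement is the Claim_ definition above) =====
theorem create_news_summary_py_spec : Claim_equal_create_news_summary_py := by
  unfold Claim_equal_create_news_summary_py Spec_create_news_summary_py
  intro fs cn _
  unfold create_news_summary_py create_news_summary_py_alt
  by_cases h0 : (PySem.Str.len fs == 0) = true
  · simp only [h0, if_true]
  · simp only [Bool.not_eq_true] at h0
    simp only [h0, Bool.false_eq_true, if_false]
    set lines := (PySem.Chars.splitOn fs.toList ['\n']).map String.ofList with hlines
    rcases hfc : pvA_findCompany cn lines with ⟨found, s⟩
    cases found with
    | true =>
      have hlen := pvA_findCompany_len hfc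
      have hfst := pvB_scan_fst cn lines none
      rw [hfc] at hfst
      simp only [if_true] at hfst
      have hne : (PySem.Str.len s == 0) = false := by
        simp only [beq_eq_false_iff_ne, ne_eq]; omega
      simp only [hfst, Bool.not_true, Bool.false_eq_true, if_false, hne]
    | false =>
      have hfst := pvB_scan_fst cn lines none
      rw [hfc] at hfst
      simp only [Bool.false_eq_true, if_false] at hfst
      have hsnd := pvB_scan_snd cn (lines := lines) none (by rw [hfc])
      simp only [Option.or] at hsnd
      simp only [hfst, Bool.not_false, if_true, pvA_fallback_eq]
      cases hfo : pvFallOpt lines with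
      | none =>
        have he : (PySem.Str.len "" == 0) = true := by decide
        simp only [hfo, hsnd, Option.getD_none, he, if_true]
      | some s' =>
        have hlen := pvFallOpt_len hfo
        have hne : (PySem.Str.len s' == 0) = false := by
          simp only [beq_eq_false_iff_ne, ne_eq]; omega
        rw [hfo] at hsnd
        simp only [Option.getD_some, hne, Bool.false_eq_true, if_false, hsnd]
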